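-- pv_equiv track=rewrite | github.com/fishtrap2/cka-coach-phase3 | src/testbed/k8s_installer.py | parse_join_command
-- ===== SOURCE A (Python) =====
-- def parse_join_command(init_output: str) -> str:
--     """
--     Extract the kubeadm join command from kubeadm init output.
--     The join command spans two lines ending with a backslash continuation.
--     """
--     lines = init_output.splitlines()
--     join_lines = []
--     capturing = False
--
--     for line in lines:
--         stripped = line.strip()
--         if stripped.startswith("kubeadm join"):
--             capturing = True
--             join_lines.append(stripped.rstrip("\\").strip())
--             if not stripped.endswith("\\"):
--                 break
--             continue
--         if capturing:
--             join_lines.append(stripped.rstrip("\\").strip())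
--             if not stripped.endswith("\\"):
--                 break
--
--     return " ".join(join_lines).strip()
-- ===== SOURCE B (Python) =====
-- def parse_join_command(init_output: str) -> str:
--     """
--     Extract the kubeadm join command from kubeadm init output.
--     Declarative: strip all lines once, compute the candidate start and end
--     indices by comprehensions, slice the continued block out, and join it.
--     """
--     stripped = [ln.strip() for ln in init_output.splitlines()]
--     starts = [i for i, t in enumerate(stripped) if t.startswith("kubeadm join")]
--     if not starts:
--         return ""
--     tail = stripped[starts[0]:]
--     ends = [j for j, t in enumerate(tail) if not t.endswith("\\")]
--     chunk = tail[: ends[0] + 1] if ends else tail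
--     return " ".join(t.rstrip("\\").strip() for t in chunk).strip()
-- ===== Notes on version B (the rewrite author's own statement) =====
-- stated objective: alternative
-- what changed: Replaces A's imperative flag-driven state machine (a capturing boolean, append-and-break inside one loop) by a declarative staged computation: strip all lines once, compute the lists of candidate start and end indices with comprehensions, slice the continued block out with list slicing, and join it; no flag, no break, no accumulator loop.
import Mathlib
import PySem

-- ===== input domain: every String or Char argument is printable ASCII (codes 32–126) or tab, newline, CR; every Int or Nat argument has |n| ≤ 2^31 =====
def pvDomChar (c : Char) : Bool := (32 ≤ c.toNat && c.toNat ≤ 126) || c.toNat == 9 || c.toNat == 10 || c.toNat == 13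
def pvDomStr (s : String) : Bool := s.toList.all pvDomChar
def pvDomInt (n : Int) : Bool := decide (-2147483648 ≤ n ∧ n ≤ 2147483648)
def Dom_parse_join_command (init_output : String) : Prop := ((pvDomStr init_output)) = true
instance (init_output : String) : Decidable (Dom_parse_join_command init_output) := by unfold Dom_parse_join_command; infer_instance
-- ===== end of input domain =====

-- B replaces A's flag-driven single-pass state machine by a declarative staged
-- computation: strip all lines, compute start/end indices by comprehensions,
-- slice the continued block, join it. Objective: alternative decomposition.


-- shared helper: Python's s.rstrip("\\") for the single-char set "\\";
-- exact: drops every trailing '\' (hand port, PySem has no rstrip-with-chars)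
def pyRstripBackslash (s : String) : String :=
  String.ofList ((s.toList.reverse.dropWhile (fun c => c == '\\')).reverse)

-- ===== PORT A =====
-- A's loop: the 'capturing' flag threaded through a single scan
def pjcLoopA : List String → Bool → List String
  | [], _ => []
  | l :: ls, cap =>
    let s := PySem.Str.strip l
    if PySem.Str.startswith s "kubeadm join" then
      let piece := PySem.Str.strip (pyRstripBackslash s)
      if PySem.Str.endswith s "\\" then piece :: pjcLoopA ls true
      else [piece]
    else if cap then
      let piece := PySem.Str.strip (pyRstripBackslash s)
      if PySem.Str.endswith s "\\" then piece :: pjcLoopA ls true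
      else [piece]
    else pjcLoopA ls false

def parse_join_command (init_output : String) : String :=
  PySem.Str.strip (PySem.Str.join " " (pjcLoopA (PySem.Str.splitlines init_output) false))

-- ===== PORT B =====
def parse_join_command_alt (init_output : String) : String :=
  let stripped := (PySem.Str.splitlines init_output).map PySem.Str.strip
  let starts := ((PySem.List.enumerate stripped 0).filter
      (fun p => PySem.Str.startswith p.2 "kubeadm join")).map (·.1)
  match starts with
  | [] => ""
  | i :: _ =>
    let tail := PySem.List.slice stripped (some i) none
    let ends := ((PySem.List.enumerate tail 0).filter
        (fun p => !(PySem.Str.endswith p.2 "\\"))).map (·.1)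
    let chunk := match ends with
      | [] => tail
      | j :: _ => PySem.List.slice tail none (some (j + 1))
    PySem.Str.strip (PySem.Str.join " "
      (chunk.map (fun t => PySem.Str.strip (pyRstripBackslash t))))

-- ===== PRECONDITION & SPEC =====
def Spec_parse_join_command (init_output : String) (out : String) : Prop := out = parse_join_command_alt init_output
instance (init_output : String) (out : String) : Decidable (Spec_parse_join_command init_output out) := by unfold Spec_parse_join_command; infer_instance

-- ===== CLAIM =====
def Claim_equal_parse_join_command : Prop := ∀ (init_output : String), Dom_parse_join_command init_output → Spec_parse_join_command init_output (parse_join_command init_output)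

-- ===== LEMMAS AND PROOFS =====
-- B's collect loop, abstracted: pjcCollect for the A-side bridge
def pjcCollect : List String → List String
  | [] => []
  | l :: ls =>
    let s := PySem.Str.strip l
    let p := PySem.Str.strip (pyRstripBackslash s)
    if PySem.Str.endswith s "\\" then p :: pjcCollect ls else [p]

-- Once capturing, A's two branches coincide, so the flagged loop is the collect loop.
theorem pjcLoopA_true (ls : List String) : pjcLoopA ls true = pjcCollect ls := by
  induction ls with
  | nil => rfl
  | cons l ls ih =>
    simp only [pjcLoopA, pjcCollect]
    split_ifs <;> simp [ih]

theorem pjcLoopA_false (ls : List String) :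
    pjcLoopA ls false =
      match ls.findIdx? (fun ln => PySem.Str.startswith (PySem.Str.strip ln) "kubeadm join") with
      | none => []
      | some i => pjcCollect (ls.drop i) := by
  induction ls with
  | nil => rfl
  | cons l ls ih =>
    by_cases h : PySem.Str.startswith (PySem.Str.strip l) "kubeadm join"
    · simp only [pjcLoopA, List.findIdx?_cons, h]
      simp [pjcCollect, pjcLoopA_true]
    · simp only [pjcLoopA, List.findIdx?_cons, h, ih]
      cases ls.findIdx? (fun ln => PySem.Str.startswith (PySem.Str.strip ln) "kubeadm join") with
      | none => simp
      | some i => simp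

-- the first index of an enumerate-filter-map comprehension IS findIdx?
theorem enumFilterHead (q : String → Bool) (L : List String) (s : Int) :
    ((((PySem.List.enumerate L s).filter (fun p => q p.2)).map (·.1)).head?)
      = (L.findIdx? q).map (fun n : Nat => s + (n : Int)) := by
  induction L generalizing s with
  | nil => rfl
  | cons l L ih =>
    rw [PySem.List.enumerate_cons, List.findIdx?_cons]
    by_cases h : q l
    · simp [h]
    · simp only [List.filter_cons, h, Bool.false_eq_true, if_false, ih]
      cases L.findIdx? q
      · simp
      · simp; omega

-- B's sliced chunk, mapped, is exactly the collect loop on the raw tail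
theorem collect_eq (M : List String) :
    pjcCollect M =
      (match (M.map PySem.Str.strip).findIdx? (fun t => !(PySem.Str.endswith t "\\")) with
        | none => M.map PySem.Str.strip
        | some j => (M.map PySem.Str.strip).take (j + 1)).map
        (fun t => PySem.Str.strip (pyRstripBackslash t)) := by
  induction M with
  | nil => rfl
  | cons l M ih =>
    simp only [List.map_cons, List.findIdx?_cons, pjcCollect]
    by_cases h : PySem.Str.endswith (PySem.Str.strip l) "\\"
    · simp only [h, Bool.not_true, if_true, Bool.false_eq_true, if_false, ih]
      cases (M.map PySem.Str.strip).findIdx? (fun t => !(PySem.Str.endswith t "\\")) with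
      | none => simp
      | some j => simp [List.take_succ_cons]
    · have h' : PySem.Chars.endswith (PySem.Chars.strip l.toList) ['\\'] = false := by
        revert h; simp [PySem.Str.endswith]
      simp [h']

-- ===== VERDICT =====
theorem parse_join_command_spec : Claim_equal_parse_join_command := by
  intro s _
  show PySem.Str.strip (PySem.Str.join " " (pjcLoopA (PySem.Str.splitlines s) false)) =
    parse_join_command_alt s
  rw [pjcLoopA_false]
  unfold parse_join_command_alt
  set L := PySem.Str.splitlines s with hL
  have hhead := enumFilterHead (fun t => PySem.Str.startswith t "kubeadm join")
      (L.map PySem.Str.strip) 0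
  rw [List.findIdx?_map] at hhead
  simp only [Function.comp_def, zero_add] at hhead
  cases hF : L.findIdx? (fun ln => PySem.Str.startswith (PySem.Str.strip ln) "kubeadm join") with
  | none =>
      rw [hF, Option.map_none] at hhead
      rw [List.head?_eq_none_iff] at hhead
      simp only [hhead]
      rfl
  | some n =>
      rw [hF, Option.map_some] at hhead
      rw [List.head?_eq_some_iff] at hhead
      obtain ⟨rest, hrest⟩ := hhead
      simp only [hrest]
      rw [PySem.List.slice_from_natCast, ← List.map_drop]
      have hhead2 := enumFilterHead (fun t => !(PySem.Str.endswith t "\\"))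
          ((L.drop n).map PySem.Str.strip) 0
      simp only [zero_add] at hhead2
      cases hG : ((L.drop n).map PySem.Str.strip).findIdx? (fun t => !(PySem.Str.endswith t "\\")) with
      | none =>
          rw [hG, Option.map_none] at hhead2
          rw [List.head?_eq_none_iff] at hhead2
          simp only [hhead2]
          rw [collect_eq (L.drop n), hG]
      | some m =>
          rw [hG, Option.map_some] at hhead2
          rw [List.head?_eq_some_iff] at hhead2
          obtain ⟨rest2, hrest2⟩ := hhead2
          simp only [hrest2]
          rw [show ((m : Int) + 1) = ((m + 1 : Nat) : Int) from by push_cast; ring,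
              PySem.List.slice_to_natCast]
          rw [collect_eq (L.drop n), hG]
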